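-- pv_equiv track=rewrite | github.com/eBouvard/form_generator | parser2/Matching/segmenter.py | get_annex_titles
-- ===== SOURCE A (Python) =====
-- def get_annex_titles(annexes):
--     i = 0
--     annex_titles = []
--     for annex in annexes:
--         title = annex[0].strip()
--         if not title:
--             if i < 1:
--                 i += 1
--                 title = "MAIN"
--             else:
--                 title = annex[1].strip()
--                 if not title:
--                     title = "OTHER"
--
--         annex_titles.append(title)
--     return annex_titles
-- ===== SOURCE B (Python) =====
-- def _title(idx, a, first_empty):
--     t = a[0].strip()
--     if t:
--         return t
--     if idx == first_empty:
--         return "MAIN"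
--     return a[1].strip() or "OTHER"
--
--
-- def get_annex_titles(annexes):
--     first_empty = next((idx for idx, a in enumerate(annexes) if not a[0].strip()), None)
--     return [_title(idx, a, first_empty) for idx, a in enumerate(annexes)]
-- ===== Notes on version B (the rewrite author's own statement) =====
-- stated objective: alternative
-- what changed: Replaces A's single stateful pass with a mutated counter by a two-phase decomposition: precompute the index of the first annex with an empty stripped title, then build the result with an index-comparing comprehension over enumerate.
import Mathlib
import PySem

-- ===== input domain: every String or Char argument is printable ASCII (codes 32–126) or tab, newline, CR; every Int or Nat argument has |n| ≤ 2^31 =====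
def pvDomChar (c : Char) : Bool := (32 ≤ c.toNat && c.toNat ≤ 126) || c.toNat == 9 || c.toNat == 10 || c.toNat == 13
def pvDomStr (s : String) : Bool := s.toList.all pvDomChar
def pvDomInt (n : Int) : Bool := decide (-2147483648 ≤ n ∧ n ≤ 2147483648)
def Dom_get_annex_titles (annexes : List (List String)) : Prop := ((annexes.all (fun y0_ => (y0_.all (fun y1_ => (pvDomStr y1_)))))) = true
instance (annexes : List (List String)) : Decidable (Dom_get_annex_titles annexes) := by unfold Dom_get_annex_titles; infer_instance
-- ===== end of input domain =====

-- B replaces A's stateful counter pass by a precomputed first-empty index plus a map; same O(n) cost (alternative decomposition).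


-- annex[0].strip() / annex[1].strip()  (Pre_ guarantees the index is in range where Python evaluates it)
def sh0 (a : List String) : String := PySem.Str.strip ((PySem.List.pyGet? a 0).getD "")
def sh1 (a : List String) : String := PySem.Str.strip ((PySem.List.pyGet? a 1).getD "")

-- ===== PORT A =====
def stepA (st : Int × List String) (annex : List String) : Int × List String :=
  let title := sh0 annex
  if title = "" then
    if st.1 < 1 then (st.1 + 1, st.2 ++ ["MAIN"])
    else
      let t2 := sh1 annex
      (st.1, st.2 ++ [if t2 = "" then "OTHER" else t2])
  else (st.1, st.2 ++ [title])

def get_annex_titles (annexes : List (List String)) : List String :=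
  (annexes.foldl stepA ((0 : Int), ([] : List String))).2

-- ===== PORT B =====
def bodyB (first_empty : Option Int) (p : Int × List String) : String :=
  let t := sh0 p.2
  if t ≠ "" then t
  else if some p.1 = first_empty then "MAIN"
  else if sh1 p.2 = "" then "OTHER" else sh1 p.2

def get_annex_titles_alt (annexes : List (List String)) : List String :=
  let first_empty : Option Int :=
    ((PySem.List.enumerate annexes 0).find? (fun p => sh0 p.2 == "")).map (·.1)
  (PySem.List.enumerate annexes 0).map (bodyB first_empty)

-- ===== PRECONDITION & SPEC =====
-- Pre_ excludes exactly the inputs on which the Python A raises IndexError: an empty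
-- annex (annex[0]), or an annex with empty stripped title, a preceding empty-titled
-- annex, and fewer than two entries (annex[1]).
def Pre_get_annex_titles (annexes : List (List String)) : Prop :=
  ∀ i, i < annexes.length →
    annexes.getD i [] ≠ [] ∧
    (sh0 (annexes.getD i []) = "" →
      (∃ b ∈ annexes.take i, sh0 b = "") →
      2 ≤ (annexes.getD i []).length)
instance (annexes : List (List String)) : Decidable (Pre_get_annex_titles annexes) := by
  unfold Pre_get_annex_titles; infer_instance

def pvWitness_get_annex_titles : List (List String) :=
  [[" Intro "], ["", "x"], ["  ", " Annex B "], [" ", "  "], ["q"]]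

def Spec_get_annex_titles (annexes : List (List String)) (out : List String) : Prop := out = get_annex_titles_alt annexes
instance (annexes : List (List String)) (out : List String) : Decidable (Spec_get_annex_titles annexes out) := by unfold Spec_get_annex_titles; infer_instance

-- ===== CLAIM (what is proved, stated in full; the proofs are below) =====
def Claim_equal_get_annex_titles : Prop := ∀ (annexes : List (List String)), Dom_get_annex_titles annexes → Pre_get_annex_titles annexes → Spec_get_annex_titles annexes (get_annex_titles annexes)

-- ===== LEMMAS AND PROOFS =====

-- common recursive characterisation: `seen` = "an empty stripped title was already consumed"
def fcom : List (List String) → Bool → List String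
  | [], _ => []
  | a :: rest, seen =>
    if sh0 a = "" then
      (if seen then (if sh1 a = "" then "OTHER" else sh1 a) else "MAIN") :: fcom rest true
    else sh0 a :: fcom rest seen

lemma A_loop (l : List (List String)) : ∀ (i : Int) (acc : List String), 0 ≤ i →
    (l.foldl stepA (i, acc)).2 = acc ++ fcom l (decide (1 ≤ i)) := by
  induction l with
  | nil => intro i acc _; simp [fcom]
  | cons a rest ih =>
    intro i acc hi
    simp only [List.foldl_cons]
    by_cases h0 : sh0 a = ""
    · by_cases hlt : i < 1
      · have : i = 0 := by omega
        subst this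
        rw [show stepA (0, acc) a = (1, acc ++ ["MAIN"]) by simp [stepA, h0]]
        rw [ih 1 (acc ++ ["MAIN"]) (by omega)]
        simp [fcom, h0]
      · have h1 : 1 ≤ i := by omega
        rw [show stepA (i, acc) a
            = (i, acc ++ [if sh1 a = "" then "OTHER" else sh1 a]) by
          simp [stepA, h0, hlt]]
        rw [ih i _ hi]
        simp [fcom, h0, h1]
    · rw [show stepA (i, acc) a = (i, acc ++ [sh0 a]) by simp [stepA, h0]]
      rw [ih i _ hi]
      simp [fcom, h0]

lemma B_map_after (l : List (List String)) : ∀ (n m : Int), m < n →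
    (PySem.List.enumerate l n).map (bodyB (some m)) = fcom l true := by
  induction l with
  | nil => intro n m _; simp [PySem.List.enumerate_nil, fcom]
  | cons a rest ih =>
    intro n m hmn
    rw [PySem.List.enumerate_cons, List.map_cons, ih (n + 1) m (by omega)]
    by_cases h0 : sh0 a = ""
    · have hne : (some n : Option Int) ≠ some m := by
        intro h; injection h with h; omega
      simp [bodyB, fcom, h0, hne]
    · simp [bodyB, fcom, h0]

lemma B_main (l : List (List String)) : ∀ (n : Int),
    (PySem.List.enumerate l n).map
      (bodyB (((PySem.List.enumerate l n).find? (fun p => sh0 p.2 == "")).map (·.1)))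
      = fcom l false := by
  induction l with
  | nil => intro n; simp [PySem.List.enumerate_nil, fcom]
  | cons a rest ih =>
    intro n
    rw [PySem.List.enumerate_cons]
    by_cases h0 : sh0 a = ""
    · have hf : List.find? (fun p => sh0 p.2 == "") ((n, a) :: PySem.List.enumerate rest (n + 1))
          = some (n, a) := by
        simp [h0]
      rw [hf]
      simp only [Option.map_some, List.map_cons]
      rw [B_map_after rest (n + 1) n (by omega)]
      simp [bodyB, fcom, h0]
    · have hf : List.find? (fun p => sh0 p.2 == "") ((n, a) :: PySem.List.enumerate rest (n + 1))
          = List.find? (fun p => sh0 p.2 == "") (PySem.List.enumerate rest (n + 1)) := by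
        simp [h0]
      rw [hf, List.map_cons, ih (n + 1)]
      simp [bodyB, fcom, h0]

lemma A_eq_fcom (l : List (List String)) : get_annex_titles l = fcom l false := by
  unfold get_annex_titles
  rw [A_loop l 0 [] (by omega)]
  simp

lemma B_eq_fcom (l : List (List String)) : get_annex_titles_alt l = fcom l false := by
  unfold get_annex_titles_alt
  exact B_main l 0

-- ===== VERDICT (by name: the statement is the Claim_ definition above) =====
theorem get_annex_titles_spec : Claim_equal_get_annex_titles := by
  intro annexes _ _
  unfold Spec_get_annex_titles
  rw [A_eq_fcom, B_eq_fcom]
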